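-- pv_equiv track=rewrite | github.com/K4KarolE/Py_Counter | src/functions.py | separator_generator
-- ===== SOURCE A (Python) =====
-- def separator_generator(total):
--     sep_dic={
--         '10': '    -    ',
--         '100': '    -   ',
--         '1000': '   -   ',
--         '10000': '  -   ',
--         '10000000': ' - '
--     }
--     for value in sep_dic:
--         if total < int(value):
--             return sep_dic[value]
-- ===== SOURCE B (Python) =====
-- import bisect
--
-- _THRESHOLDS = [10, 100, 1000, 10000, 10000000]
-- _SEPS = ['    -    ', '    -   ', '   -   ', '  -   ', ' - ']
--
-- def separator_generator(total):
--     idx = bisect.bisect_right(_THRESHOLDS, total)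
--     return _SEPS[idx] if idx < len(_SEPS) else None
-- ===== Notes on version B (the rewrite author's own statement) =====
-- stated objective: idiomatic
-- what changed: Replaces A's linear for-loop over string dict keys (with int() conversion per key) by a bisect_right binary search into a sorted integer threshold table paired with a separator list.
import Mathlib
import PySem

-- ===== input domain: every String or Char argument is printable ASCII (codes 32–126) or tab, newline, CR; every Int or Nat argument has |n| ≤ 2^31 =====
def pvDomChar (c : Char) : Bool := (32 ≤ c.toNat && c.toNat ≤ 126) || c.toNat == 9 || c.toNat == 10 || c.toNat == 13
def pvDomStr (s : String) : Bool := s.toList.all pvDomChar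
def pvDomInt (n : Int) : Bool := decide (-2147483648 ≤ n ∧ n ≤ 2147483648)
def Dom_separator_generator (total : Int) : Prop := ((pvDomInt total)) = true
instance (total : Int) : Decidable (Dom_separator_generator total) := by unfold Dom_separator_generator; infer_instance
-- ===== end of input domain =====

-- B replaces A's linear scan over dict keys by a bisect_right binary search into a sorted threshold table (idiomatic; return value only).

-- ===== PORT A =====
-- the dict literal of A (insertion order)
def sepDic : PySem.Dict String String :=
  PySem.Dict.ofList [("10", "    -    "), ("100", "    -   "), ("1000", "   -   "),
                     ("10000", "  -   "), ("10000000", " - ")]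

-- the for-loop over the dict's keys, early return on 'total < int(value)'
def sepLoop (total : Int) : List String → Option String
  | [] => none
  | value :: rest =>
      match PySem.Int.ofStr? value with
      | none => none   -- int(value) would raise; never reached for A's literal keys
      | some v => if total < v then PySem.Dict.get? sepDic value else sepLoop total rest

def separator_generator (total : Int) : Option String :=
  sepLoop total (PySem.Dict.keys sepDic)

-- ===== PORT B =====
def bThresholds : List Int := [10, 100, 1000, 10000, 10000000]
def bSeps : List String := ["    -    ", "    -   ", "   -   ", "  -   ", " - "]

-- bisect.bisect_right is PySem.List.bisectRight (the prelude's binary search)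
def separator_generator_alt (total : Int) : Option String :=
  let idx := PySem.List.bisectRight bThresholds total
  if idx < bSeps.length then PySem.List.pyGet? bSeps (Int.ofNat idx) else none

-- ===== PRECONDITION & SPEC =====
def Spec_separator_generator (total : Int) (out : Option String) : Prop := out = separator_generator_alt total
instance (total : Int) (out : Option String) : Decidable (Spec_separator_generator total out) := by unfold Spec_separator_generator; infer_instance

-- ===== CLAIM (what is proved, stated in full; the proofs are below) =====
def Claim_equal_separator_generator : Prop := ∀ (total : Int), Dom_separator_generator total → Spec_separator_generator total (separator_generator total)

-- ===== LEMMAS AND PROOFS =====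

theorem ofStr_lits :
    PySem.Int.ofStr? "10" = some 10 ∧ PySem.Int.ofStr? "100" = some 100 ∧
    PySem.Int.ofStr? "1000" = some 1000 ∧ PySem.Int.ofStr? "10000" = some 10000 ∧
    PySem.Int.ofStr? "10000000" = some 10000000 := by decide

theorem sg_eq (total : Int) : separator_generator total = separator_generator_alt total := by
  by_cases h1 : total < 10
  · have h2 : total < 100 := by omega
    have h3 : total < 1000 := by omega
    have h4 : total < 10000 := by omega
    have h5 : total < 10000000 := by omega
    simp [separator_generator, separator_generator_alt, sepDic, sepLoop,
      PySem.List.bisectRight, PySem.List.bisectRightLoop, bThresholds, bSeps,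
      PySem.Dict.ofList, PySem.Dict.keys, PySem.Dict.get?, PySem.Dict.update,
      PySem.Dict.items, PySem.Dict.empty, PySem.Dict.insert,
      ofStr_lits.1, ofStr_lits.2.1, ofStr_lits.2.2.1, ofStr_lits.2.2.2.1,
      ofStr_lits.2.2.2.2, PySem.List.pyGet?, PySem.List.pyIdx?, h1, h2, h3, h4, h5]
  · by_cases h2 : total < 100
    · have h3 : total < 1000 := by omega
      have h4 : total < 10000 := by omega
      have h5 : total < 10000000 := by omega
      simp [separator_generator, separator_generator_alt, sepDic, sepLoop,
      PySem.List.bisectRight, PySem.List.bisectRightLoop, bThresholds, bSeps,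
      PySem.Dict.ofList, PySem.Dict.keys, PySem.Dict.get?, PySem.Dict.update,
      PySem.Dict.items, PySem.Dict.empty, PySem.Dict.insert,
      ofStr_lits.1, ofStr_lits.2.1, ofStr_lits.2.2.1, ofStr_lits.2.2.2.1,
      ofStr_lits.2.2.2.2, PySem.List.pyGet?, PySem.List.pyIdx?, h1, h2, h3, h4, h5]
    · by_cases h3 : total < 1000
      · have h4 : total < 10000 := by omega
        have h5 : total < 10000000 := by omega
        simp [separator_generator, separator_generator_alt, sepDic, sepLoop,
      PySem.List.bisectRight, PySem.List.bisectRightLoop, bThresholds, bSeps,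
      PySem.Dict.ofList, PySem.Dict.keys, PySem.Dict.get?, PySem.Dict.update,
      PySem.Dict.items, PySem.Dict.empty, PySem.Dict.insert,
      ofStr_lits.1, ofStr_lits.2.1, ofStr_lits.2.2.1, ofStr_lits.2.2.2.1,
      ofStr_lits.2.2.2.2, PySem.List.pyGet?, PySem.List.pyIdx?, h1, h2, h3, h4, h5]
      · by_cases h4 : total < 10000
        · have h5 : total < 10000000 := by omega
          simp [separator_generator, separator_generator_alt, sepDic, sepLoop,
      PySem.List.bisectRight, PySem.List.bisectRightLoop, bThresholds, bSeps,
      PySem.Dict.ofList, PySem.Dict.keys, PySem.Dict.get?, PySem.Dict.update,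
      PySem.Dict.items, PySem.Dict.empty, PySem.Dict.insert,
      ofStr_lits.1, ofStr_lits.2.1, ofStr_lits.2.2.1, ofStr_lits.2.2.2.1,
      ofStr_lits.2.2.2.2, PySem.List.pyGet?, PySem.List.pyIdx?, h1, h2, h3, h4, h5]
        · by_cases h5 : total < 10000000
          · simp [separator_generator, separator_generator_alt, sepDic, sepLoop,
      PySem.List.bisectRight, PySem.List.bisectRightLoop, bThresholds, bSeps,
      PySem.Dict.ofList, PySem.Dict.keys, PySem.Dict.get?, PySem.Dict.update,
      PySem.Dict.items, PySem.Dict.empty, PySem.Dict.insert,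
      ofStr_lits.1, ofStr_lits.2.1, ofStr_lits.2.2.1, ofStr_lits.2.2.2.1,
      ofStr_lits.2.2.2.2, PySem.List.pyGet?, PySem.List.pyIdx?, h1, h2, h3, h4, h5]
          · simp [separator_generator, separator_generator_alt, sepDic, sepLoop,
      PySem.List.bisectRight, PySem.List.bisectRightLoop, bThresholds, bSeps,
      PySem.Dict.ofList, PySem.Dict.keys, PySem.Dict.get?, PySem.Dict.update,
      PySem.Dict.items, PySem.Dict.empty, PySem.Dict.insert,
      ofStr_lits.1, ofStr_lits.2.1, ofStr_lits.2.2.1, ofStr_lits.2.2.2.1,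
      ofStr_lits.2.2.2.2, PySem.List.pyGet?, PySem.List.pyIdx?, h1, h2, h3, h4, h5]

-- ===== VERDICT (by name: the statement is the Claim_ definition above) =====
theorem separator_generator_spec : Claim_equal_separator_generator := by
  intro total _
  exact sg_eq total
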